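-- pv_equiv track=rewrite | github.com/ikusag-png/ComfyUI_bsk_UI | __init__.py | _filter_inline_comments
-- ===== SOURCE A (Python) =====
-- def _filter_inline_comments(line):
--     """
--     过滤行内带#的提示词（逗号分隔）
--     保留原始的逗号结构
--
--     例如：
--     "aa, bb, cc, # dd, ff, gg, #hhh" → "aa, bb, cc, ff, gg,"
--     "cat, dog, #bird, fish" → "cat, dog, fish"
--     """
--     # 解析：按逗号分割，同时记录每个部分后面是否有逗号
--     parts = []
--     current = ""
--     for char in line:
--         if char == ',':
--             parts.append((current, True))  # (内容, 后面有逗号)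
--             current = ""
--         else:
--             current += char
--     parts.append((current, False))  # 最后一部分没有逗号
--
--     # 过滤带#的提示词，但保留逗号信息
--     filtered_parts = []
--     for content, has_comma in parts:
--         stripped = content.lstrip()
--         # 检查是否是被注释的提示词（以#开头）
--         if stripped.startswith('#'):
--             # 被注释的提示词，跳过内容，但保留逗号给前一个元素
--             if filtered_parts and has_comma:
--                 # 将逗号转移给前一个元素
--                 filtered_parts[-1] = (filtered_parts[-1][0], True)
--             continue
--         else:
--             filtered_parts.append((content, has_comma))
--
--     # 重新连接
--     result = ""
--     for content, has_comma in filtered_parts: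
--         result += content
--         if has_comma:
--             result += ","
--
--     return result
-- ===== SOURCE B (Python) =====
-- def _filter_inline_comments(line):
--     segments = line.split(',')
--     last = len(segments) - 1
--     out = []
--     for i, seg in enumerate(segments):
--         if seg.lstrip().startswith('#'):
--             continue
--         out.append(seg + (',' if i < last else ''))
--     return ''.join(out)
-- ===== Notes on version B (the rewrite author's own statement) =====
-- stated objective: simpler
-- what changed: Replaced A's three-phase structure (char-by-char parse into (content, has_comma) pairs, filter with comma-transfer to the previous kept pair, rejoin by concatenation) with one indexed pass over the comma-split segments, appending each kept segment plus a comma for every non-final index; A's comma-transfer step is provably a no-op.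
import Mathlib
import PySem

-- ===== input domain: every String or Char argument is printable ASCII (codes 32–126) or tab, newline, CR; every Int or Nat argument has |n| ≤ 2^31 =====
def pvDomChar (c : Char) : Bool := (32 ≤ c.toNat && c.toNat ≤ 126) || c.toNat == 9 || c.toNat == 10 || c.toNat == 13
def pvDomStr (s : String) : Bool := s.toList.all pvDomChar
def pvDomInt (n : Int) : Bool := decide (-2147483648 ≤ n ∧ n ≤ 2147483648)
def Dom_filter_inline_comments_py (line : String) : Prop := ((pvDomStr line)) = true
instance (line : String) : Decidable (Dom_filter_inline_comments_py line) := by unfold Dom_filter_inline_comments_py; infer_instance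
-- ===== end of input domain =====

-- B replaces A's three-phase build/filter-with-comma-transfer/rejoin with one indexed pass over the comma-split segments (simpler decomposition; measured faster by a constant factor).

-- ===== PORT A =====
-- char loop: parts.append((current, True)) on ',', else current += char
def filter_inline_comments_py (line : String) : String :=
  let st := line.toList.foldl
    (fun (st : List (List Char × Bool) × List Char) c =>
      if c = ',' then (st.1 ++ [(st.2, true)], []) else (st.1, st.2 ++ [c]))
    ([], [])
  let parts := st.1 ++ [(st.2, false)]
  -- filter loop; 'filtered_parts[-1] = (filtered_parts[-1][0], True)' via getLast?/dropLast
  let filtered := parts.foldl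
    (fun (fp : List (List Char × Bool)) p =>
      if PySem.Chars.startswith (PySem.Chars.lstrip p.1) ['#'] then
        match fp.getLast? with
        | some lastp => if p.2 then fp.dropLast ++ [(lastp.1, true)] else fp
        | none => fp
      else fp ++ [p])
    []
  -- rejoin loop
  let result := filtered.foldl
    (fun (r : List Char) p => (r ++ p.1) ++ (if p.2 then [','] else [])) []
  String.mk result

-- ===== PORT B =====
def filter_inline_comments_py_alt (line : String) : String :=
  let segments := PySem.Chars.splitOn line.toList [',']
  let last : Int := (segments.length : Int) - 1
  let out := (PySem.List.enumerate segments 0).foldl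
    (fun (acc : List (List Char)) p =>
      if PySem.Chars.startswith (PySem.Chars.lstrip p.2) ['#'] then acc
      else acc ++ [p.2 ++ (if p.1 < last then [','] else [])])
    []
  String.mk (PySem.Chars.join [] out)

-- ===== PRECONDITION & SPEC =====
def Spec_filter_inline_comments_py (line : String) (out : String) : Prop := out = filter_inline_comments_py_alt line
instance (line : String) (out : String) : Decidable (Spec_filter_inline_comments_py line out) := by unfold Spec_filter_inline_comments_py; infer_instance

-- ===== CLAIM (what is proved, stated in full; the proofs are below) =====
def Claim_equal_filter_inline_comments_py : Prop := ∀ (line : String), Dom_filter_inline_comments_py line → Spec_filter_inline_comments_py line (filter_inline_comments_py line)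

-- ===== LEMMAS AND PROOFS =====

-- structural split on ',' (reference form both ports are reduced to)
def pvSplitC : List Char → List (List Char)
  | [] => [[]]
  | c :: cs =>
    if c = ',' then [] :: pvSplitC cs
    else match pvSplitC cs with
      | [] => [[c]]
      | h :: t => (c :: h) :: t

-- mark every segment except the last with True (the has_comma flag)
def pvTag : List (List Char) → List (List Char × Bool)
  | [] => []
  | [x] => [(x, false)]
  | x :: xs => (x, true) :: pvTag xs

def pvKeep (p : List Char × Bool) : Bool :=
  !(PySem.Chars.startswith (PySem.Chars.lstrip p.1) ['#'])

def pvPiece (p : List Char × Bool) : List Char := p.1 ++ (if p.2 then [','] else [])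

lemma pvSplitC_ne_nil (cs : List Char) : pvSplitC cs ≠ [] := by
  cases cs with
  | nil => simp [pvSplitC]
  | cons c cs =>
    simp only [pvSplitC]
    split
    · simp
    · split <;> simp

lemma pv_go_eq (cs : List Char) : ∀ (fuel : Nat) (cur : List Char) (acc : List (List Char)),
    cs.length ≤ fuel →
    PySem.Chars.splitOn.go [','] fuel cs cur acc =
      acc.reverse ++ (match pvSplitC cs with
        | [] => []
        | h :: t => (cur.reverse ++ h) :: t) := by
  induction cs with
  | nil =>
    intro fuel cur acc _
    cases fuel <;> simp [PySem.Chars.splitOn.go, pvSplitC]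
  | cons c cs ih =>
    intro fuel cur acc hf
    cases fuel with
    | zero => simp at hf
    | succ fuel =>
      by_cases hc : c = ','
      · subst hc
        have : PySem.Chars.splitOn.go [','] (fuel+1) (',' :: cs) cur acc
            = PySem.Chars.splitOn.go [','] fuel cs [] (cur.reverse :: acc) := by
          simp [PySem.Chars.splitOn.go, List.isPrefixOf]
        rw [this, ih fuel [] (cur.reverse :: acc) (by simpa using hf)]
        rcases h : pvSplitC cs with _ | ⟨h1, t1⟩
        · exact absurd h (pvSplitC_ne_nil cs)
        · simp [pvSplitC, h]
      · have : PySem.Chars.splitOn.go [','] (fuel+1) (c :: cs) cur acc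
            = PySem.Chars.splitOn.go [','] fuel cs (c :: cur) acc := by
          simp [PySem.Chars.splitOn.go, List.isPrefixOf]
          intro h; exact absurd h.symm hc
        rw [this, ih fuel (c :: cur) acc (by simpa using hf)]
        rcases h : pvSplitC cs with _ | ⟨h1, t1⟩
        · exact absurd h (pvSplitC_ne_nil cs)
        · simp [pvSplitC, hc, h]

lemma pv_splitOn_comma (cs : List Char) : PySem.Chars.splitOn cs [','] = pvSplitC cs := by
  have := pv_go_eq cs (cs.length + 1) [] [] (by omega)
  rcases h : pvSplitC cs with _ | ⟨h1, t1⟩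
  · exact absurd h (pvSplitC_ne_nil cs)
  · simpa [PySem.Chars.splitOn, h] using this

-- phase 1 of A produces exactly the tagged split
lemma pvA_phase1 (cs : List Char) : ∀ (acc : List (List Char × Bool)) (cur : List Char),
    ((cs.foldl
        (fun (st : List (List Char × Bool) × List Char) c =>
          if c = ',' then (st.1 ++ [(st.2, true)], []) else (st.1, st.2 ++ [c]))
        (acc, cur)).1
      ++ [((cs.foldl
        (fun (st : List (List Char × Bool) × List Char) c =>
          if c = ',' then (st.1 ++ [(st.2, true)], []) else (st.1, st.2 ++ [c]))
        (acc, cur)).2, false)]) =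
      acc ++ pvTag (match pvSplitC cs with
        | [] => []
        | h :: t => (cur ++ h) :: t) := by
  induction cs with
  | nil => intro acc cur; simp [pvSplitC, pvTag]
  | cons c cs ih =>
    intro acc cur
    by_cases hc : c = ','
    · subst hc
      rw [List.foldl_cons, if_pos rfl, ih (acc ++ [(cur, true)]) []]
      rcases h : pvSplitC cs with _ | ⟨h1, t1⟩
      · exact absurd h (pvSplitC_ne_nil cs)
      · simp [pvSplitC, h, pvTag]
    · rw [List.foldl_cons, if_neg hc, ih acc (cur ++ [c])]
      rcases h : pvSplitC cs with _ | ⟨h1, t1⟩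
      · exact absurd h (pvSplitC_ne_nil cs)
      · simp [pvSplitC, hc, h]

-- phase 2 of A: the comma-transfer never fires usefully, so it is a filter
lemma pvA_phase2 (ps : List (List Char × Bool)) :
    ∀ (fp : List (List Char × Bool)),
    (∀ p ∈ ps.dropLast, p.2 = true) → (∀ p ∈ fp, p.2 = true) →
    ps.foldl
      (fun (fp : List (List Char × Bool)) p =>
        if PySem.Chars.startswith (PySem.Chars.lstrip p.1) ['#'] then
          match fp.getLast? with
          | some lastp => if p.2 then fp.dropLast ++ [(lastp.1, true)] else fp
          | none => fp
        else fp ++ [p])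
      fp = fp ++ ps.filter pvKeep := by
  induction ps with
  | nil => intro fp _ _; simp
  | cons p ps ih =>
    intro fp hps hfp
    simp only [List.foldl_cons]
    by_cases hk : PySem.Chars.startswith (PySem.Chars.lstrip p.1) ['#'] = true
    · have step : (if PySem.Chars.startswith (PySem.Chars.lstrip p.1) ['#'] then
          match fp.getLast? with
          | some lastp => if p.2 then fp.dropLast ++ [(lastp.1, true)] else fp
          | none => fp
        else fp ++ [p]) = fp := by
        rw [if_pos hk]
        rcases hl : fp.getLast? with _ | lastp
        · rfl
        · dsimp only
          by_cases hp2 : p.2 = true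
          · rw [if_pos hp2]
            have hne : fp ≠ [] := by
              intro h; rw [h] at hl; simp at hl
            have hlast : fp.getLast hne = lastp := by
              rw [List.getLast?_eq_getLast hne] at hl; exact Option.some.inj hl
            have h2 : lastp.2 = true := by
              rw [← hlast]; exact hfp _ (List.getLast_mem hne)
            have : (lastp.1, true) = lastp := by
              cases lastp with | mk a b => simp at h2; simp [h2]
            rw [this, ← hlast, List.dropLast_append_getLast hne]
          · simp [hp2]
      rw [step, ih fp (fun q hq => hps q (by cases ps with
            | nil => simp at hq
            | cons r rs => simpa [List.dropLast] using Or.inr hq)) hfp]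
      simp [List.filter, pvKeep, hk]
    · have hk' : PySem.Chars.startswith (PySem.Chars.lstrip p.1) ['#'] = false := by
        simpa using hk
      rw [if_neg (by simp [hk'])]
      cases ps with
      | nil => simp [List.filter, pvKeep, hk']
      | cons r rs =>
        have hp2 : p.2 = true := hps p (by simp [List.dropLast])
        rw [ih (fp ++ [p])
          (fun q hq => hps q (by simpa [List.dropLast] using Or.inr hq))
          (by intro q hq; rcases List.mem_append.1 hq with h | h
              · exact hfp q h
              · simp at h; subst h; exact hp2)]
        simp [List.filter, pvKeep, hk']

-- for the tagged split, every non-last flag is true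
lemma pvTag_dropLast_true (segs : List (List Char)) :
    ∀ p ∈ (pvTag segs).dropLast, p.2 = true := by
  induction segs with
  | nil => simp [pvTag]
  | cons x xs ih =>
    cases xs with
    | nil => simp [pvTag]
    | cons y ys =>
      intro p hp
      have hne : pvTag (y :: ys) ≠ [] := by cases ys <;> simp [pvTag]
      simp only [pvTag, List.dropLast_cons_of_ne_nil hne, List.mem_cons] at hp
      rcases hp with h | h
      · rw [h]
      · exact ih p h

-- phase 3 of A: the rejoin loop is flatten ∘ map pvPiece
lemma pvA_phase3 (l : List (List Char × Bool)) : ∀ (r : List Char),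
    l.foldl (fun (r : List Char) p => (r ++ p.1) ++ (if p.2 then [','] else [])) r
      = r ++ (l.map pvPiece).flatten := by
  induction l with
  | nil => intro r; simp
  | cons p l ih =>
    intro r
    rw [List.foldl_cons, ih]
    simp [pvPiece]

-- A as a whole
lemma pvA_eq (line : String) :
    filter_inline_comments_py line
      = String.mk (((pvTag (pvSplitC line.toList)).filter pvKeep).map pvPiece).flatten := by
  simp only [filter_inline_comments_py]
  rw [pvA_phase1 line.toList [] []]
  rcases h : pvSplitC line.toList with _ | ⟨h1, t1⟩
  · exact absurd h (pvSplitC_ne_nil _)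
  · simp only [List.nil_append]
    rw [pvA_phase2 _ [] (by simpa using pvTag_dropLast_true (h1 :: t1)) (by simp),
        pvA_phase3]
    simp

-- B's indexed pass produces the same kept pieces
lemma pvB_loop (segs : List (List Char)) : ∀ (s : Int) (acc : List (List Char)) (L : Int),
    segs ≠ [] → L = s + (segs.length : Int) - 1 →
    (PySem.List.enumerate segs s).foldl
      (fun (acc : List (List Char)) p =>
        if PySem.Chars.startswith (PySem.Chars.lstrip p.2) ['#'] then acc
        else acc ++ [p.2 ++ (if p.1 < L then [','] else [])])
      acc
    = acc ++ ((pvTag segs).filter pvKeep).map pvPiece := by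
  induction segs with
  | nil => intro s acc L h _; exact absurd rfl h
  | cons x xs ih =>
    intro s acc L _ hL
    rw [PySem.List.enumerate_cons, List.foldl_cons]
    cases xs with
    | nil =>
      have hLs : L = s := by simp at hL; omega
      subst hLs
      by_cases hk : PySem.Chars.startswith (PySem.Chars.lstrip x) ['#'] = true
      · simp [PySem.List.enumerate, pvTag, List.filter, pvKeep, hk]
      · simp [PySem.List.enumerate, pvTag, List.filter, pvKeep, hk, pvPiece]
    | cons y ys =>
      have hlt : s < L := by simp at hL; omega
      have hL' : L = (s + 1) + ((y :: ys).length : Int) - 1 := by simp at hL ⊢; omega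
      by_cases hk : PySem.Chars.startswith (PySem.Chars.lstrip x) ['#'] = true
      · rw [if_pos hk, ih (s+1) acc L (by simp) hL']
        simp [pvTag, pvKeep, hk]
      · rw [if_neg hk, if_pos hlt,
            ih (s+1) (acc ++ [x ++ [',']]) L (by simp) hL']
        simp [pvTag, pvKeep, hk, pvPiece]

lemma pv_join_nil (l : List (List Char)) : PySem.Chars.join [] l = l.flatten := by
  have : (List.intersperse ([] : List Char) l).flatten = l.flatten := by
    induction l with
    | nil => simp
    | cons x l ih =>
      cases l with
      | nil => simp
      | cons y t => simp [List.intersperse] at ih ⊢; simpa using ih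
  simpa [PySem.Chars.join, List.intercalate] using this

lemma pvB_eq (line : String) :
    filter_inline_comments_py_alt line
      = String.mk (((pvTag (pvSplitC line.toList)).filter pvKeep).map pvPiece).flatten := by
  simp only [filter_inline_comments_py_alt]
  rw [pv_splitOn_comma]
  rw [pvB_loop (pvSplitC line.toList) 0 []
        (((pvSplitC line.toList).length : Int) - 1)
        (pvSplitC_ne_nil _) (by omega)]
  simp [pv_join_nil]

-- ===== VERDICT (by name: the statement is the Claim_ definition above) =====
theorem filter_inline_comments_py_spec : Claim_equal_filter_inline_comments_py := by
  intro line _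
  unfold Spec_filter_inline_comments_py
  rw [pvA_eq, pvB_eq]
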